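-- pv_equiv track=rewrite | github.com/RegardV/JournalCraftCrew | journal-platform-backend/app/services/knowledge_query_service.py | _extract_focus_areas
-- ===== SOURCE A (Python) =====
-- from typing import Dict, Any, Optional, List, Tuple
--
-- def _extract_focus_areas(content: str, metadata: Dict[str, Any]) -> List[str]:
--     """Extract key focus areas from content and metadata."""
--     focus_areas = []
--
--     # Extract from theme
--     theme = metadata.get('theme', '').lower()
--     if 'anxiety' in theme:
--         focus_areas.append('anxiety-management')
--     if 'productivity' in theme:
--         focus_areas.append('productivity-techniques')
--     if 'mindfulness' in theme:
--         focus_areas.append('mindfulness-practices')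
--     if 'creativity' in theme:
--         focus_areas.append('creative-expression')
--
--     # Extract from author style
--     style = metadata.get('authorStyle', '').lower()
--     if 'research' in style or 'evidence' in style:
--         focus_areas.append('evidence-based')
--     if 'empathetic' in style or 'compassionate' in style:
--         focus_areas.append('emotional-intelligence')
--
--     # Extract keywords from content
--     content_lower = content.lower()
--     keywords = ['habits', 'routine', 'self-care', 'reflection', 'growth', 'wellbeing']
--     for keyword in keywords:
--         if keyword in content_lower and keyword not in focus_areas:
--             focus_areas.append(keyword)
--
--     return focus_areas[:5]  # Limit to top 5 focus areas
-- ===== SOURCE B (Python) =====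
-- def _extract_focus_areas(content, metadata):
--     """Extract key focus areas: recursive scan over a rule table that stops
--     as soon as 5 tags are collected (no build-everything-then-slice)."""
--     theme = metadata.get('theme', '').lower()
--     style = metadata.get('authorStyle', '').lower()
--     text = content.lower()
--     rules = [
--         (theme, ['anxiety'], 'anxiety-management'),
--         (theme, ['productivity'], 'productivity-techniques'),
--         (theme, ['mindfulness'], 'mindfulness-practices'),
--         (theme, ['creativity'], 'creative-expression'),
--         (style, ['research', 'evidence'], 'evidence-based'),
--         (style, ['empathetic', 'compassionate'], 'emotional-intelligence'),
--     ] + [(text, [k], k) for k in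
--          ['habits', 'routine', 'self-care', 'reflection', 'growth', 'wellbeing']]
--
--     def pick(rules, room):
--         if room == 0 or not rules:
--             return []
--         src, triggers, tag = rules[0]
--         if any(t in src for t in triggers):
--             return [tag] + pick(rules[1:], room - 1)
--         return pick(rules[1:], room)
--
--     return pick(rules, 5)
-- ===== Notes on version B (the rewrite author's own statement) =====
-- stated objective: alternative
-- what changed: Replaces A's twelve sequential if/append statements plus a final [:5] slice (and the vacuous 'not already present' guard, which can never fire since no earlier tag equals a content keyword) with a recursive early-terminating scan over a (source, triggers, tag) rule table carrying a remaining-room counter: it stops matching as soon as 5 tags are collected and never builds then truncates a list.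
import Mathlib
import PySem

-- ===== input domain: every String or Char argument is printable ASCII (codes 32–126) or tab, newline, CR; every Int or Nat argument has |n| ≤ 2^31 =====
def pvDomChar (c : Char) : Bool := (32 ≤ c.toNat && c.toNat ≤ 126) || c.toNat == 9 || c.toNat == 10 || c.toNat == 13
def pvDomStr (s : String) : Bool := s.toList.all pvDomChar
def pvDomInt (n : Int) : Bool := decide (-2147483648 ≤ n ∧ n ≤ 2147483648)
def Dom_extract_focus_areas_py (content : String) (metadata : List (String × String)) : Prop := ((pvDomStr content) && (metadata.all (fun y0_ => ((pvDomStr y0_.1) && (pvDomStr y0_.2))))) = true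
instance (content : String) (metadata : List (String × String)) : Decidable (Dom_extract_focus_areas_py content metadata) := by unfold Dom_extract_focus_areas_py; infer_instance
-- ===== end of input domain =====

-- B replaces A's twelve if/append statements plus the final [:5] slice (and the vacuous 'not already present' guard) by a recursive early-terminating scan over a rule table with a remaining-room counter; same cost, different decomposition.


-- metadata.get(k, d): first-match lookup in the association list (dict convention)
def pyMetaGetD (m : List (String × String)) (k d : String) : String :=
  match m.find? (fun p => p.1 == k) with
  | some p => p.2
  | none => d

-- ===== PORT A =====
def extract_focus_areas_py (content : String) (metadata : List (String × String)) : List String :=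
  let focus_areas : List String := []
  let theme := PySem.Str.lower (pyMetaGetD metadata "theme" "")
  let focus_areas := if PySem.Str.isIn "anxiety" theme then focus_areas ++ ["anxiety-management"] else focus_areas
  let focus_areas := if PySem.Str.isIn "productivity" theme then focus_areas ++ ["productivity-techniques"] else focus_areas
  let focus_areas := if PySem.Str.isIn "mindfulness" theme then focus_areas ++ ["mindfulness-practices"] else focus_areas
  let focus_areas := if PySem.Str.isIn "creativity" theme then focus_areas ++ ["creative-expression"] else focus_areas
  let style := PySem.Str.lower (pyMetaGetD metadata "authorStyle" "")
  let focus_areas := if PySem.Str.isIn "research" style || PySem.Str.isIn "evidence" style then focus_areas ++ ["evidence-based"] else focus_areas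
  let focus_areas := if PySem.Str.isIn "empathetic" style || PySem.Str.isIn "compassionate" style then focus_areas ++ ["emotional-intelligence"] else focus_areas
  let content_lower := PySem.Str.lower content
  let keywords := ["habits", "routine", "self-care", "reflection", "growth", "wellbeing"]
  let focus_areas := keywords.foldl
    (fun fa keyword => if PySem.Str.isIn keyword content_lower && !(fa.contains keyword) then fa ++ [keyword] else fa)
    focus_areas
  PySem.List.slice focus_areas none (some 5)

-- ===== PORT B =====
-- pick(rules, room): recursive scan that stops once `room` tags were emitted
def pickRules : List (String × List String × String) → Nat → List String
  | _, 0 => []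
  | [], _ + 1 => []
  | (src, triggers, tag) :: rest, n + 1 =>
      if triggers.any (fun t => PySem.Str.isIn t src) then tag :: pickRules rest n
      else pickRules rest (n + 1)

def extract_focus_areas_py_alt (content : String) (metadata : List (String × String)) : List String :=
  let theme := PySem.Str.lower (pyMetaGetD metadata "theme" "")
  let style := PySem.Str.lower (pyMetaGetD metadata "authorStyle" "")
  let text := PySem.Str.lower content
  let rules : List (String × List String × String) :=
    [(theme, ["anxiety"], "anxiety-management"),
     (theme, ["productivity"], "productivity-techniques"),
     (theme, ["mindfulness"], "mindfulness-practices"),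
     (theme, ["creativity"], "creative-expression"),
     (style, ["research", "evidence"], "evidence-based"),
     (style, ["empathetic", "compassionate"], "emotional-intelligence")]
    ++ (["habits", "routine", "self-care", "reflection", "growth", "wellbeing"].map
          (fun k => (text, [k], k)))
  pickRules rules 5

-- ===== PRECONDITION & SPEC =====
def Spec_extract_focus_areas_py (content : String) (metadata : List (String × String)) (out : List String) : Prop := out = extract_focus_areas_py_alt content metadata
instance (content : String) (metadata : List (String × String)) (out : List String) : Decidable (Spec_extract_focus_areas_py content metadata out) := by unfold Spec_extract_focus_areas_py; infer_instance

-- ===== CLAIM =====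
def Claim_equal_extract_focus_areas_py : Prop := ∀ (content : String) (metadata : List (String × String)), Dom_extract_focus_areas_py content metadata → Spec_extract_focus_areas_py content metadata (extract_focus_areas_py content metadata)

-- ===== LEMMAS AND PROOFS =====

-- B's early-terminating scan computes the first `n` matching tags
theorem pickRules_eq (rules : List (String × List String × String)) :
    ∀ n, pickRules rules n
      = ((rules.filter (fun r => r.2.1.any (fun t => PySem.Str.isIn t r.1))).map (fun r => r.2.2)).take n := by
  induction rules with
  | nil => intro n; cases n <;> simp [pickRules]
  | cons r rest ih =>
    intro n
    cases n with
    | zero => simp [pickRules]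
    | succ n =>
      obtain ⟨src, triggers, tag⟩ := r
      rw [List.filter_cons]
      by_cases h : (triggers.any (fun t => PySem.Str.isIn t src)) = true
      · simp only [pickRules, ih]
        rw [if_pos h, if_pos h, List.map_cons, List.take_succ_cons]
      · simp only [pickRules, ih]
        rw [if_neg h, if_neg h]

-- an element distinct from t and not in l is not in the conditional append
theorem notmem_ite_append {x t : String} {l : List String} {c : Prop} [Decidable c]
    (h1 : x ∉ l) (h2 : x ≠ t) : x ∉ (if c then l ++ [t] else l) := by
  split <;> simp [h1, h2]

-- A's keyword loop, started from an accumulator containing none of the (distinct) keywords,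
-- appends exactly the keywords found in the content.
theorem keyword_loop_eq (c : String) :
    ∀ (ks acc : List String), ks.Nodup → (∀ k ∈ ks, k ∉ acc) →
    ks.foldl (fun fa keyword => if PySem.Str.isIn keyword c && !(fa.contains keyword) then fa ++ [keyword] else fa) acc
      = acc ++ ks.filter (fun k => PySem.Str.isIn k c) := by
  intro ks
  induction ks with
  | nil => intro acc _ _; simp
  | cons k ks ih =>
    intro acc hnd hmem
    have hk : acc.contains k = false := by
      simp [List.contains_eq_mem]
      exact hmem k (by simp)
    have hnd' : ks.Nodup := (List.nodup_cons.mp hnd).2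
    have hknotin : k ∉ ks := (List.nodup_cons.mp hnd).1
    simp only [List.foldl_cons]
    by_cases hin : PySem.Str.isIn k c = true
    · rw [if_pos (by rw [hin, hk]; rfl)]
      rw [ih (acc ++ [k]) hnd' ?_]
      · rw [List.filter_cons, if_pos hin]
        simp
      · intro k' hk'
        simp only [List.mem_append, List.mem_singleton]
        rintro (h | rfl)
        · exact hmem k' (by simp [hk']) h
        · exact hknotin hk'
    · have hin' : PySem.Str.isIn k c = false := by simpa using hin
      rw [if_neg (by rw [hin']; simp)]
      rw [ih acc hnd' (fun k' h => hmem k' (by simp [h]))]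
      rw [List.filter_cons, if_neg (by rw [hin']; simp)]

-- ===== VERDICT =====
set_option maxHeartbeats 1600000 in
theorem extract_focus_areas_py_spec : Claim_equal_extract_focus_areas_py := by
  intro content metadata _
  show extract_focus_areas_py content metadata = extract_focus_areas_py_alt content metadata
  unfold extract_focus_areas_py extract_focus_areas_py_alt
  generalize PySem.Str.lower (pyMetaGetD metadata "theme" "") = th
  generalize PySem.Str.lower (pyMetaGetD metadata "authorStyle" "") = st
  generalize PySem.Str.lower content = tx
  simp only []
  rw [keyword_loop_eq tx _ _ (by decide) ?_]
  · rw [pickRules_eq]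
    rw [show (5 : Int) = ((5 : Nat) : Int) from rfl, PySem.List.slice_to_natCast]
    congr 1
    simp only [List.filter_append, List.filter_map, List.map_append, List.map_map]
    congr 1
    · -- theme/style tags: A's if-chain = B's filtered-and-projected rule table
      simp only [List.filter_cons, List.filter_nil, List.any_cons, List.any_nil, Bool.or_false]
      split_ifs <;> simp [List.map]
    · -- content keywords: A's filter = B's filtered-and-projected mapped rules
      rw [List.filter_congr (l := ["habits", "routine", "self-care", "reflection", "growth", "wellbeing"])
          (fun k _ => (by simp only [Function.comp_apply, List.any_cons, List.any_nil, Bool.or_false] :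
            ((fun r : String × List String × String => r.2.1.any fun t => PySem.Str.isIn t r.1) ∘ fun k => (tx, [k], k)) k
              = PySem.Str.isIn k tx))]
      rw [show List.map ((fun r : String × List String × String => r.2.2) ∘ fun k : String => (tx, [k], k))
            = List.map id from by funext l; congr 1]
      rw [List.map_id]
  · intro k hk
    fin_cases hk <;>
      · repeat apply notmem_ite_append
        · simp
        all_goals decide
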